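-- pv_equiv track=rewrite | github.com/kcwww/Problem-Solving | 백준/Silver/2578. 빙고/빙고.py | exe_bingo
-- ===== SOURCE A (Python) =====
-- def check_cross(bingo):
--     check = 0
--     temp = 0
--     for i in range(5):
--         if bingo[i][i] == -1:
--             temp += 1
--     if temp == 5:
--         check += 1
--     temp = 0
--     j = 4
--     for i in range(5):
--         if bingo[i][j] == -1:
--             temp += 1
--         j -= 1
--     if temp == 5:
--         check += 1
--     return check
--
-- def check_line(bingo):
--     check = 0
--     for i in range(5):
--         temp = 0
--         for j in range(5):
--             if bingo[j][i] == -1: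
--                 temp += 1
--         if temp == 5:
--             check += 1
--     for i in range(5):
--         temp = 0
--         for j in range(5):
--             if bingo[i][j] == -1:
--                 temp += 1
--         if temp == 5:
--             check += 1
--     return check
--
-- def remove_num(bingo, num):
--     for i in range(5):
--         for j in range(5):
--             if bingo[i][j] == num:
--                 bingo[i][j] = -1
--                 return
--     return
--
-- def exe_bingo(bingo, answer):
--     idx = 0
--     for i in range(5):
--         for j in range(5):
--             idx += 1
--             remove_num(bingo, answer[i][j])
--             cross = check_cross(bingo)
--             cross += check_line(bingo)
--             if cross >= 3:
--                 return idx
--     return idx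
-- ===== SOURCE B (Python) =====
-- # B: incremental line counters instead of recounting all 12 lines every turn.
-- # NOTE: unlike A, B does not mutate the caller's `bingo` (equivalence is about the return value).
-- def exe_bingo(bingo, answer):
--     board = [list(row) for row in bingo]
--     rows = [sum(1 for j in range(5) if board[i][j] == -1) for i in range(5)]
--     cols = [sum(1 for i in range(5) if board[i][j] == -1) for j in range(5)]
--     diag = sum(1 for i in range(5) if board[i][i] == -1)
--     anti = sum(1 for i in range(5) if board[i][4 - i] == -1)
--     lines = rows.count(5) + cols.count(5) + (diag == 5) + (anti == 5)
--     idx = 0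
--     for i in range(5):
--         for j in range(5):
--             idx += 1
--             v = answer[i][j]
--             if v != -1:
--                 pos = None
--                 for p in range(5):
--                     for q in range(5):
--                         if board[p][q] == v:
--                             pos = (p, q)
--                             break
--                     if pos is not None:
--                         break
--                 if pos is not None:
--                     p, q = pos
--                     board[p][q] = -1
--                     rows[p] += 1
--                     if rows[p] == 5:
--                         lines += 1
--                     cols[q] += 1
--                     if cols[q] == 5:
--                         lines += 1
--                     if p == q:
--                         diag += 1
--                         if diag == 5:
--                             lines += 1
--                     if p + q == 4:
--                         anti += 1
--                         if anti == 5: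
--                             lines += 1
--             if lines >= 3:
--                 return idx
--     return idx
-- ===== Notes on version B (the rewrite author's own statement) =====
-- stated objective: alternative
-- what changed: A rescans all 12 bingo lines (check_cross + check_line over the whole 5x5 board) after every one of the 25 turns; B keeps 12 incremental counters (rows, cols, two diagonals) plus a completed-line total, updating only the 3-4 counters touched by the marked cell each turn.
import Mathlib
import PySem

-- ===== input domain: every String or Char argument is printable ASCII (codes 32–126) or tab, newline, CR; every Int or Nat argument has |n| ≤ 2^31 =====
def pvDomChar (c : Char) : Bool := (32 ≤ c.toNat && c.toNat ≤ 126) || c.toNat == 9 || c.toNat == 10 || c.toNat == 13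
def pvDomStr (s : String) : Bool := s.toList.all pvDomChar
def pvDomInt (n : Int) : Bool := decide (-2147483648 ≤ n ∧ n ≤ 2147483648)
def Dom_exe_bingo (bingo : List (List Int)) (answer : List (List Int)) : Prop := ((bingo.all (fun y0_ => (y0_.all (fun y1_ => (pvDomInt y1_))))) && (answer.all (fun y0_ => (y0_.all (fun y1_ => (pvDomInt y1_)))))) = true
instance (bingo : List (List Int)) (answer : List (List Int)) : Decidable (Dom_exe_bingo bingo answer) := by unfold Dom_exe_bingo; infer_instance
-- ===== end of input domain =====

-- B replaces A's full recount of all 12 bingo lines after every call with incremental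
-- per-line counters updated only at the marked cell (return value only: A mutates `bingo`
-- in place, B works on a copy).

-- ===== PORT A =====
-- shared low-level board accessors (Python's bingo[i][j] read / write on in-range indices)
def pvGet (b : List (List Int)) (i j : Nat) : Int := (b.getD i []).getD j 0

def pvSet (b : List (List Int)) (i j : Nat) (v : Int) : List (List Int) :=
  b.set i ((b.getD i []).set j v)

-- row-major list of the 25 cell coordinates (the iteration order of A's nested loops)
def pvCells : List (Nat × Nat) :=
  (List.range 5).flatMap (fun i => (List.range 5).map (fun j => (i, j)))

def removeNum (b : List (List Int)) (num : Int) : List (List Int) :=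
  match pvCells.find? (fun p => pvGet b p.1 p.2 == num) with
  | some p => pvSet b p.1 p.2 (-1)
  | none => b

def checkCross (b : List (List Int)) : Int :=
  (if (List.range 5).countP (fun i => pvGet b i i == -1) = 5 then 1 else 0)
  + (if (List.range 5).countP (fun i => pvGet b i (4 - i) == -1) = 5 then 1 else 0)

def checkLine (b : List (List Int)) : Int :=
  ((List.range 5).countP (fun i => (List.range 5).countP (fun j => pvGet b j i == -1) = 5) : Int)
  + ((List.range 5).countP (fun i => (List.range 5).countP (fun j => pvGet b i j == -1) = 5) : Int)

def stepA (answer : List (List Int)) (s : List (List Int) × Option Int) (t : Nat) :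
    List (List Int) × Option Int :=
  match s.2 with
  | some _ => s
  | none =>
    let b := removeNum s.1 (pvGet answer (t / 5) (t % 5))
    if checkCross b + checkLine b ≥ 3 then (b, some ((t : Int) + 1)) else (b, none)

def exe_bingo (bingo : List (List Int)) (answer : List (List Int)) : Int :=
  ((List.range 25).foldl (stepA answer) (bingo, none)).2.getD 25

-- ===== PORT B =====
structure BState where
  board : List (List Int)
  rows : List Int
  cols : List Int
  diag : Int
  anti : Int
  lines : Int
  done : Option Int

def stepB (answer : List (List Int)) (s : BState) (t : Nat) : BState :=
  match s.done with
  | some _ => s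
  | none =>
    let v := pvGet answer (t / 5) (t % 5)
    let s' :=
      if v ≠ -1 then
        match pvCells.find? (fun p => pvGet s.board p.1 p.2 == v) with
        | some (p, q) =>
          let rows' := s.rows.set p (s.rows.getD p 0 + 1)
          let cols' := s.cols.set q (s.cols.getD q 0 + 1)
          let diag' := if p = q then s.diag + 1 else s.diag
          let anti' := if p + q = 4 then s.anti + 1 else s.anti
          let lines' := s.lines
            + (if rows'.getD p 0 = 5 then 1 else 0)
            + (if cols'.getD q 0 = 5 then 1 else 0)
            + (if p = q ∧ diag' = 5 then 1 else 0)
            + (if p + q = 4 ∧ anti' = 5 then 1 else 0)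
          { board := pvSet s.board p q (-1), rows := rows', cols := cols',
            diag := diag', anti := anti', lines := lines', done := none }
        | none => s
      else s
    if s'.lines ≥ 3 then { s' with done := some ((t : Int) + 1) } else s'

def exe_bingo_alt (bingo : List (List Int)) (answer : List (List Int)) : Int :=
  -- `board = [list(row) for row in bingo]` is the identity on immutable lists
  let board := bingo
  let rows := (List.range 5).map
    (fun i => (((List.range 5).countP (fun j => pvGet board i j == -1) : Nat) : Int))
  let cols := (List.range 5).map
    (fun j => (((List.range 5).countP (fun i => pvGet board i j == -1) : Nat) : Int))
  let diag : Int := ((List.range 5).countP (fun i => pvGet board i i == -1) : Nat)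
  let anti : Int := ((List.range 5).countP (fun i => pvGet board i (4 - i) == -1) : Nat)
  let lines : Int := (rows.count 5 : Nat) + (cols.count 5 : Nat)
    + (if diag = 5 then 1 else 0) + (if anti = 5 then 1 else 0)
  let s := (List.range 25).foldl (stepB answer)
    ⟨board, rows, cols, diag, anti, lines, none⟩
  s.done.getD 25

-- ===== PRECONDITION & SPEC =====
-- Pre_ = the natural 5×5 shape: A indexes bingo[i][j] and answer[i][j] for i,j < 5 and
-- raises IndexError otherwise.  This also excludes degenerate inputs where a short
-- `answer` escapes the IndexError only because ≥ 3 lines complete first (see cites).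
def Pre_exe_bingo (bingo : List (List Int)) (answer : List (List Int)) : Prop :=
  5 ≤ bingo.length ∧ (∀ i < 5, 5 ≤ (bingo.getD i []).length) ∧
  5 ≤ answer.length ∧ (∀ i < 5, 5 ≤ (answer.getD i []).length)

instance (bingo : List (List Int)) (answer : List (List Int)) :
    Decidable (Pre_exe_bingo bingo answer) := by unfold Pre_exe_bingo; infer_instance

def pvWitness_exe_bingo : List (List Int) × List (List Int) :=
  ([[1,2,3,4,5],[6,7,8,9,10],[11,12,13,14,15],[16,17,18,19,20],[21,22,23,24,25]],
   [[5,4,3,2,1],[10,9,8,7,6],[15,14,13,12,11],[20,19,18,17,16],[25,24,23,22,21]])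

def Spec_exe_bingo (bingo : List (List Int)) (answer : List (List Int)) (out : Int) : Prop := out = exe_bingo_alt bingo answer
instance (bingo : List (List Int)) (answer : List (List Int)) (out : Int) : Decidable (Spec_exe_bingo bingo answer out) := by unfold Spec_exe_bingo; infer_instance

-- ===== CLAIM (what is proved, stated in full; the proofs are below) =====
def Claim_equal_exe_bingo : Prop := ∀ (bingo : List (List Int)) (answer : List (List Int)), Dom_exe_bingo bingo answer → Pre_exe_bingo bingo answer → Spec_exe_bingo bingo answer (exe_bingo bingo answer)

-- ===== LEMMAS AND PROOFS =====

def Shape (b : List (List Int)) : Prop :=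
  5 ≤ b.length ∧ ∀ i < 5, 5 ≤ (b.getD i []).length

-- the actual numbers of marked (-1) cells on each of the 12 lines
def rowCnt (b : List (List Int)) (i : Nat) : Nat :=
  (List.range 5).countP (fun j => pvGet b i j == -1)
def colCnt (b : List (List Int)) (j : Nat) : Nat :=
  (List.range 5).countP (fun i => pvGet b i j == -1)
def diagCnt (b : List (List Int)) : Nat :=
  (List.range 5).countP (fun i => pvGet b i i == -1)
def antiCnt (b : List (List Int)) : Nat :=
  (List.range 5).countP (fun i => pvGet b i (4 - i) == -1)

def BInv (sA : List (List Int) × Option Int) (sB : BState) : Prop :=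
  Shape sA.1 ∧ sB.board = sA.1 ∧
  sB.rows = (List.range 5).map (fun i => (rowCnt sA.1 i : Int)) ∧
  sB.cols = (List.range 5).map (fun j => (colCnt sA.1 j : Int)) ∧
  sB.diag = (diagCnt sA.1 : Int) ∧ sB.anti = (antiCnt sA.1 : Int) ∧
  sB.lines = checkCross sA.1 + checkLine sA.1 ∧
  sB.done = sA.2

lemma foldl_sim {α β γ : Type} (R : α → β → Prop) (fa : α → γ → α) (fb : β → γ → β)
    (h : ∀ a b t, R a b → R (fa a t) (fb b t)) :
    ∀ (L : List γ) (a : α) (b : β), R a b → R (L.foldl fa a) (L.foldl fb b) := by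
  intro L
  induction L with
  | nil => intro a b hR; exact hR
  | cons x xs ih => intro a b hR; exact ih _ _ (h _ _ _ hR)

lemma mem_pvCells (p : Nat × Nat) : p ∈ pvCells ↔ p.1 < 5 ∧ p.2 < 5 := by
  obtain ⟨a, b⟩ := p
  simp [pvCells, List.mem_flatMap, List.mem_range]

lemma countP_update (n k : Nat) (f f' : Nat → Bool) (hk : k < n)
    (hagree : ∀ m, m < n → m ≠ k → f' m = f m) (hold : f k = false) :
    (List.range n).countP f' = (List.range n).countP f + (if f' k then 1 else 0) := by
  revert hk hagree
  induction n with
  | zero => intro hk _; omega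
  | succ n ih =>
    intro hk hagree
    rw [List.range_succ, List.countP_append, List.countP_append]
    by_cases hkn : k = n
    · have hpre : (List.range n).countP f' = (List.range n).countP f := by
        apply List.countP_congr
        intro x hx
        have hxn : x < n := List.mem_range.mp hx
        rw [hagree x (by omega) (by omega)]
      rw [hpre, hkn]
      rw [hkn] at hold
      cases hf' : f' n <;> simp [hf', hold] <;> omega
    · have hk' : k < n := by omega
      have tail_eq : f' n = f n := hagree n (by omega) (Ne.symm hkn)
      rw [ih hk' (fun m hm hmk => hagree m (by omega) hmk)]
      cases hfn : f n <;> simp [tail_eq, hfn] <;> omega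

lemma countP_ne_of_false (n k : Nat) (f : Nat → Bool) (hk : k < n) (hfk : f k = false) :
    (List.range n).countP f ≠ n := by
  intro h
  have h' : List.countP f (List.range n) = (List.range n).length := by simpa using h
  have := List.countP_eq_length.mp h' k (List.mem_range.mpr hk)
  rw [hfk] at this
  exact Bool.false_ne_true this

lemma getD_row_set (b : List (List Int)) (p i : Nat) (r : List Int) (hp : p < b.length) :
    (b.set p r).getD i [] = if i = p then r else b.getD i [] := by
  by_cases h : i = p
  · subst h; simp [List.getD_eq_getElem?_getD, List.getElem?_set_self hp]
  · simp [List.getD_eq_getElem?_getD, List.getElem?_set_ne (fun hpe => h hpe.symm), h]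

lemma getD_elt_set (l : List Int) (q j : Nat) (v : Int) (hq : q < l.length) :
    (l.set q v).getD j 0 = if j = q then v else l.getD j 0 := by
  by_cases h : j = q
  · subst h; simp [List.getD_eq_getElem?_getD, List.getElem?_set_self hq]
  · simp [List.getD_eq_getElem?_getD, List.getElem?_set_ne (fun hpe => h hpe.symm), h]

lemma shape_set (b : List (List Int)) (p q : Nat) (v : Int) (hb : Shape b) :
    Shape (pvSet b p q v) := by
  obtain ⟨h1, h2⟩ := hb
  by_cases hp : p < b.length
  · refine ⟨by simpa [pvSet] using h1, ?_⟩
    intro i hi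
    rw [pvSet, getD_row_set b p i _ hp]
    by_cases h : i = p
    · simp [h, List.length_set]; exact h2 p (h ▸ hi)
    · simp [h]; exact h2 i hi
  · refine ⟨by simpa [pvSet] using h1, ?_⟩
    intro i hi
    rw [pvSet, List.set_eq_of_length_le (by omega)]
    exact h2 i hi

lemma get_set (b : List (List Int)) (p q : Nat) (v : Int) (hb : Shape b)
    (hp : p < 5) (hq : q < 5) (i j : Nat) (hi : i < 5) (hj : j < 5) :
    pvGet (pvSet b p q v) i j = if i = p ∧ j = q then v else pvGet b i j := by
  obtain ⟨h1, h2⟩ := hb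
  have hpb : p < b.length := by omega
  have hqr : q < (b.getD p []).length := by have := h2 p hp; omega
  unfold pvGet pvSet
  rw [getD_row_set b p i _ hpb]
  by_cases hip : i = p
  · rw [if_pos hip, getD_elt_set _ q j v hqr]
    by_cases hjq : j = q
    · simp [hip, hjq]
    · simp [hip, hjq]
  · rw [if_neg hip]
    simp [hip]

lemma set_self (b : List (List Int)) (p q : Nat) (hb : Shape b) (hp : p < 5) (hq : q < 5) :
    pvSet b p q (pvGet b p q) = b := by
  obtain ⟨h1, h2⟩ := hb
  have hpb : p < b.length := by omega
  have hqr : q < (b.getD p []).length := by have := h2 p hp; omega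
  rw [pvSet, pvGet]
  have hrow : b.getD p [] = b[p] := by
    rw [List.getD_eq_getElem?_getD, List.getElem?_eq_getElem hpb]; rfl
  have helt : (b.getD p []).getD q 0 = (b.getD p [])[q] := by
    rw [List.getD_eq_getElem?_getD, List.getElem?_eq_getElem hqr]; rfl
  rw [helt, List.set_getElem_self hqr, hrow, List.set_getElem_self hpb]

lemma getD_map_range (n k : Nat) (f : Nat → Int) (hk : k < n) :
    (((List.range n).map f).getD k 0) = f k := by
  simp [List.getD_eq_getElem?_getD, List.getElem?_map, List.getElem?_range, hk]

lemma set_map_range (n k : Nat) (f : Nat → Int) (v : Int) (hk : k < n) :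
    ((List.range n).map f).set k v = (List.range n).map (fun i => if i = k then v else f i) := by
  apply List.ext_getElem (by simp)
  intro i h1 h2
  simp only [List.getElem_set, List.getElem_map, List.getElem_range]
  have hi : i < n := by simpa using h2
  by_cases h : i = k
  · simp [h]
  · simp [h, Ne.symm h]

lemma removeNum_neg (b : List (List Int)) (hb : Shape b) : removeNum b (-1) = b := by
  unfold removeNum
  cases hfind : pvCells.find? (fun p => pvGet b p.1 p.2 == (-1 : Int)) with
  | none => rfl
  | some p =>
    have hm := (mem_pvCells p).mp (List.mem_of_find?_eq_some hfind)
    have hpv : pvGet b p.1 p.2 = -1 := by simpa using List.find?_some hfind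
    dsimp only
    rw [← hpv]
    exact set_self b p.1 p.2 hb hm.1 hm.2

lemma rowCnt_set (b : List (List Int)) (p q : Nat) (hb : Shape b) (hp : p < 5) (hq : q < 5)
    (hne : pvGet b p q ≠ -1) (i : Nat) (hi : i < 5) :
    rowCnt (pvSet b p q (-1)) i = if i = p then rowCnt b p + 1 else rowCnt b i := by
  unfold rowCnt
  by_cases hip : i = p
  · subst hip
    rw [countP_update 5 q (fun j => pvGet b i j == -1)
        (fun j => pvGet (pvSet b i q (-1)) i j == -1) hq
        (fun m hm hmq => by
          show (pvGet (pvSet b i q (-1)) i m == -1) = (pvGet b i m == -1)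
          rw [get_set b i q (-1) hb hi hq i m hi hm]; simp [hmq])
        (by simp [hne])]
    simp [get_set b i q (-1) hb hi hq i q hi hq]
  · rw [if_neg hip]
    apply List.countP_congr
    intro j hj
    rw [get_set b p q _ hb hp hq i j hi (List.mem_range.mp hj)]
    simp [hip]

lemma colCnt_set (b : List (List Int)) (p q : Nat) (hb : Shape b) (hp : p < 5) (hq : q < 5)
    (hne : pvGet b p q ≠ -1) (j : Nat) (hj : j < 5) :
    colCnt (pvSet b p q (-1)) j = if j = q then colCnt b q + 1 else colCnt b j := by
  unfold colCnt
  by_cases hjq : j = q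
  · subst hjq
    rw [countP_update 5 p (fun i => pvGet b i j == -1)
        (fun i => pvGet (pvSet b p j (-1)) i j == -1) hp
        (fun m hm hmp => by
          show (pvGet (pvSet b p j (-1)) m j == -1) = (pvGet b m j == -1)
          rw [get_set b p j (-1) hb hp hj m j hm hj]; simp [hmp])
        (by simp [hne])]
    simp [get_set b p j (-1) hb hp hj p j hp hj]
  · rw [if_neg hjq]
    apply List.countP_congr
    intro i hi
    rw [get_set b p q _ hb hp hq i j (List.mem_range.mp hi) hj]
    simp [hjq]

lemma diagCnt_set (b : List (List Int)) (p q : Nat) (hb : Shape b) (hp : p < 5) (hq : q < 5)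
    (hne : pvGet b p q ≠ -1) :
    diagCnt (pvSet b p q (-1)) = if p = q then diagCnt b + 1 else diagCnt b := by
  unfold diagCnt
  by_cases hpq : p = q
  · subst hpq
    rw [if_pos rfl,
        countP_update 5 p (fun i => pvGet b i i == -1)
        (fun i => pvGet (pvSet b p p (-1)) i i == -1) hp
        (fun m hm hmp => by
          show (pvGet (pvSet b p p (-1)) m m == -1) = (pvGet b m m == -1)
          rw [get_set b p p (-1) hb hp hp m m hm hm]; simp [hmp])
        (by simp [hne])]
    simp [get_set b p p (-1) hb hp hp p p hp hp]
  · rw [if_neg hpq]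
    apply List.countP_congr
    intro i hi
    rw [get_set b p q _ hb hp hq i i (List.mem_range.mp hi) (List.mem_range.mp hi)]
    have : ¬(i = p ∧ i = q) := by rintro ⟨rfl, rfl⟩; exact hpq rfl
    simp [this]

lemma antiCnt_set (b : List (List Int)) (p q : Nat) (hb : Shape b) (hp : p < 5) (hq : q < 5)
    (hne : pvGet b p q ≠ -1) :
    antiCnt (pvSet b p q (-1)) = if p + q = 4 then antiCnt b + 1 else antiCnt b := by
  unfold antiCnt
  by_cases hpq : p + q = 4
  · have hq4 : 4 - p = q := by omega
    rw [if_pos hpq,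
        countP_update 5 p (fun i => pvGet b i (4 - i) == -1)
        (fun i => pvGet (pvSet b p q (-1)) i (4 - i) == -1) hp
        (fun m hm hmp => by
          show (pvGet (pvSet b p q (-1)) m (4 - m) == -1) = (pvGet b m (4 - m) == -1)
          rw [get_set b p q (-1) hb hp hq m (4 - m) hm (by omega)]
          have hnp : ¬(m = p ∧ 4 - m = q) := by rintro ⟨rfl, _⟩; exact hmp rfl
          simp [hnp])
        (by
          show (pvGet b p (4 - p) == -1) = false
          rw [hq4]; simp [hne])]
    rw [hq4]
    simp [get_set b p q (-1) hb hp hq p q hp hq]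
  · rw [if_neg hpq]
    apply List.countP_congr
    intro i hi
    have hi5 : i < 5 := List.mem_range.mp hi
    rw [get_set b p q _ hb hp hq i (4 - i) hi5 (by omega)]
    have : ¬(i = p ∧ 4 - i = q) := by rintro ⟨rfl, rfl⟩; omega
    simp [this]


lemma checkCross_eq (b : List (List Int)) :
    checkCross b = (if diagCnt b = 5 then 1 else 0) + (if antiCnt b = 5 then 1 else 0) := rfl

lemma checkLine_eq (b : List (List Int)) :
    checkLine b = ((List.range 5).countP (fun i => colCnt b i = 5) : Nat)
      + ((List.range 5).countP (fun i => rowCnt b i = 5) : Nat) := rfl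

lemma linesOf_set (b : List (List Int)) (p q : Nat) (hb : Shape b) (hp : p < 5) (hq : q < 5)
    (hne : pvGet b p q ≠ -1) :
    checkCross (pvSet b p q (-1)) + checkLine (pvSet b p q (-1)) =
      checkCross b + checkLine b
      + (if rowCnt b p + 1 = 5 then 1 else 0)
      + (if colCnt b q + 1 = 5 then 1 else 0)
      + (if p = q ∧ diagCnt b + 1 = 5 then 1 else 0)
      + (if p + q = 4 ∧ antiCnt b + 1 = 5 then 1 else 0) := by
  have hrne : rowCnt b p ≠ 5 := by
    unfold rowCnt; exact countP_ne_of_false 5 q _ hq (by simp [hne])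
  have hcne : colCnt b q ≠ 5 := by
    unfold colCnt; exact countP_ne_of_false 5 p _ hp (by simp [hne])
  have L1 : (List.range 5).countP (fun i => rowCnt (pvSet b p q (-1)) i = 5)
      = (List.range 5).countP (fun i => rowCnt b i = 5)
        + (if rowCnt b p + 1 = 5 then 1 else 0) := by
    rw [countP_update 5 p (fun i => rowCnt b i = 5)
        (fun i => rowCnt (pvSet b p q (-1)) i = 5) hp
        (fun m hm hmp => by simp [rowCnt_set b p q hb hp hq hne m hm, hmp])
        (by simp [hrne])]
    simp [rowCnt_set b p q hb hp hq hne p hp]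
  have L2 : (List.range 5).countP (fun i => colCnt (pvSet b p q (-1)) i = 5)
      = (List.range 5).countP (fun i => colCnt b i = 5)
        + (if colCnt b q + 1 = 5 then 1 else 0) := by
    rw [countP_update 5 q (fun i => colCnt b i = 5)
        (fun i => colCnt (pvSet b p q (-1)) i = 5) hq
        (fun m hm hmq => by simp [colCnt_set b p q hb hp hq hne m hm, hmq])
        (by simp [hcne])]
    simp [colCnt_set b p q hb hp hq hne q hq]
  have D : (if diagCnt (pvSet b p q (-1)) = 5 then (1 : Int) else 0)
      = (if diagCnt b = 5 then (1 : Int) else 0)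
        + (if p = q ∧ diagCnt b + 1 = 5 then 1 else 0) := by
    by_cases hpq : p = q
    · subst hpq
      have hdne : diagCnt b ≠ 5 := by
        unfold diagCnt; exact countP_ne_of_false 5 p _ hp (by simp [hne])
      rw [diagCnt_set b p p hb hp hp hne, if_pos rfl]
      simp [hdne]
    · rw [diagCnt_set b p q hb hp hq hne, if_neg hpq]
      simp [hpq]
  have A : (if antiCnt (pvSet b p q (-1)) = 5 then (1 : Int) else 0)
      = (if antiCnt b = 5 then (1 : Int) else 0)
        + (if p + q = 4 ∧ antiCnt b + 1 = 5 then 1 else 0) := by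
    by_cases hpq : p + q = 4
    · have hq4 : 4 - p = q := by omega
      have hane : antiCnt b ≠ 5 := by
        unfold antiCnt
        exact countP_ne_of_false 5 p _ hp (by
          show (pvGet b p (4 - p) == -1) = false
          rw [hq4]; simp [hne])
      rw [antiCnt_set b p q hb hp hq hne, if_pos hpq]
      simp [hane, hpq]
    · rw [antiCnt_set b p q hb hp hq hne, if_neg hpq]
      simp [hpq]
  rw [checkCross_eq, checkCross_eq, checkLine_eq, checkLine_eq, L1, L2, D, A]
  push_cast
  ring

lemma and_ite_self (c : Prop) [Decidable c] (A B C : Int) :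
    (c ∧ (if c then A else B) = C) ↔ (c ∧ A = C) := by
  by_cases h : c <;> simp [h]

lemma count5_map (f : Nat → Nat) :
    ((List.range 5).map (fun i => (f i : Int))).count 5
      = (List.range 5).countP (fun i => f i = 5) := by
  rw [List.count_eq_countP, List.countP_map]
  apply List.countP_congr
  intro x _
  simp
  omega

lemma stepInv (answer : List (List Int)) (sA : List (List Int) × Option Int) (sB : BState)
    (t : Nat) (h : BInv sA sB) : BInv (stepA answer sA t) (stepB answer sB t) := by
  obtain ⟨bbd, bdn⟩ := sA
  obtain ⟨bB, brows, bcols, bdiag, banti, blines, bdone⟩ := sB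
  obtain ⟨hsh, hbd, hrows, hcols, hdiag, hanti, hlines, hdone⟩ := h
  simp only at hsh hbd hrows hcols hdiag hanti hlines hdone
  subst hbd hrows hcols hdiag hanti hlines hdone
  cases bdone with
  | some x => exact ⟨hsh, rfl, rfl, rfl, rfl, rfl, rfl, rfl⟩
  | none =>
    unfold stepA stepB
    dsimp only
    by_cases hv1 : pvGet answer (t / 5) (t % 5) = -1
    · rw [hv1, removeNum_neg bB hsh, if_neg (by simp : ¬((-1 : Int) ≠ -1))]
      by_cases hc : checkCross bB + checkLine bB ≥ 3
      · rw [if_pos hc, if_pos hc]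
        exact ⟨hsh, rfl, rfl, rfl, rfl, rfl, rfl, rfl⟩
      · rw [if_neg hc, if_neg hc]
        exact ⟨hsh, rfl, rfl, rfl, rfl, rfl, rfl, rfl⟩
    · rw [if_pos hv1]
      unfold removeNum
      cases hfind : pvCells.find? (fun p => pvGet bB p.1 p.2 == pvGet answer (t / 5) (t % 5)) with
      | none =>
        dsimp only
        by_cases hc : checkCross bB + checkLine bB ≥ 3
        · rw [if_pos hc, if_pos hc]
          exact ⟨hsh, rfl, rfl, rfl, rfl, rfl, rfl, rfl⟩
        · rw [if_neg hc, if_neg hc]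
          exact ⟨hsh, rfl, rfl, rfl, rfl, rfl, rfl, rfl⟩
      | some pq =>
        obtain ⟨p, q⟩ := pq
        have hmem := (mem_pvCells (p, q)).mp (List.mem_of_find?_eq_some hfind)
        have hp : p < 5 := hmem.1
        have hq : q < 5 := hmem.2
        have hpv : pvGet bB p q = pvGet answer (t / 5) (t % 5) := by
          simpa using List.find?_some hfind
        have hne : pvGet bB p q ≠ -1 := by rw [hpv]; exact hv1
        have hsh' : Shape (pvSet bB p q (-1)) := shape_set bB p q (-1) hsh
        dsimp only
        have hrowF : ((List.range 5).map (fun i => (rowCnt bB i : Int))).set p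
              (((List.range 5).map (fun i => (rowCnt bB i : Int))).getD p 0 + 1)
            = (List.range 5).map (fun i => (rowCnt (pvSet bB p q (-1)) i : Int)) := by
          rw [getD_map_range 5 p _ hp, set_map_range 5 p _ _ hp]
          apply List.map_congr_left
          intro m hm
          have hm5 : m < 5 := List.mem_range.mp hm
          rw [rowCnt_set bB p q hsh hp hq hne m hm5]
          by_cases hmp : m = p <;> simp [hmp]
        have hcolF : ((List.range 5).map (fun j => (colCnt bB j : Int))).set q
              (((List.range 5).map (fun j => (colCnt bB j : Int))).getD q 0 + 1)
            = (List.range 5).map (fun j => (colCnt (pvSet bB p q (-1)) j : Int)) := by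
          rw [getD_map_range 5 q _ hq, set_map_range 5 q _ _ hq]
          apply List.map_congr_left
          intro m hm
          have hm5 : m < 5 := List.mem_range.mp hm
          rw [colCnt_set bB p q hsh hp hq hne m hm5]
          by_cases hmq : m = q <;> simp [hmq]
        have hdiagF : (if p = q then (diagCnt bB : Int) + 1 else (diagCnt bB : Int))
            = (diagCnt (pvSet bB p q (-1)) : Int) := by
          rw [diagCnt_set bB p q hsh hp hq hne]
          by_cases hpq : p = q <;> simp [hpq]
        have hantiF : (if p + q = 4 then (antiCnt bB : Int) + 1 else (antiCnt bB : Int))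
            = (antiCnt (pvSet bB p q (-1)) : Int) := by
          rw [antiCnt_set bB p q hsh hp hq hne]
          by_cases hpq : p + q = 4 <;> simp [hpq]
        have hlinesF : checkCross bB + checkLine bB
              + (if (((List.range 5).map (fun i => (rowCnt bB i : Int))).set p
                    (((List.range 5).map (fun i => (rowCnt bB i : Int))).getD p 0 + 1)).getD p 0
                    = 5 then 1 else 0)
              + (if (((List.range 5).map (fun j => (colCnt bB j : Int))).set q
                    (((List.range 5).map (fun j => (colCnt bB j : Int))).getD q 0 + 1)).getD q 0
                    = 5 then 1 else 0)
              + (if p = q ∧ (if p = q then (diagCnt bB : Int) + 1 else (diagCnt bB : Int)) = 5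
                    then 1 else 0)
              + (if p + q = 4 ∧ (if p + q = 4 then (antiCnt bB : Int) + 1 else (antiCnt bB : Int)) = 5
                    then 1 else 0)
            = checkCross (pvSet bB p q (-1)) + checkLine (pvSet bB p q (-1)) := by
          rw [hrowF, hcolF, getD_map_range 5 p _ hp, getD_map_range 5 q _ hq,
            linesOf_set bB p q hsh hp hq hne]
          have hr : rowCnt (pvSet bB p q (-1)) p = rowCnt bB p + 1 := by
            rw [rowCnt_set bB p q hsh hp hq hne p hp, if_pos rfl]
          have hc2 : colCnt (pvSet bB p q (-1)) q = colCnt bB q + 1 := by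
            rw [colCnt_set bB p q hsh hp hq hne q hq, if_pos rfl]
          have e1 : ((rowCnt bB p + 1 : Nat) : Int) = 5 ↔ rowCnt bB p + 1 = 5 := by omega
          have e2 : ((colCnt bB q + 1 : Nat) : Int) = 5 ↔ colCnt bB q + 1 = 5 := by omega
          have e3 : (p = q ∧ (diagCnt bB : Int) + 1 = 5) ↔ (p = q ∧ diagCnt bB + 1 = 5) := by
            constructor <;> exact fun h => ⟨h.1, by omega⟩
          have e4 : (p + q = 4 ∧ (antiCnt bB : Int) + 1 = 5) ↔ (p + q = 4 ∧ antiCnt bB + 1 = 5) := by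
            constructor <;> exact fun h => ⟨h.1, by omega⟩
          simp only [and_ite_self, hr, hc2, Nat.cast_add, Nat.cast_one] at *
          simp only [e1, e2, e3, e4]
          try push_cast
          try ring
        simp only [hlinesF]
        simp only [hrowF, hcolF, hdiagF, hantiF]
        by_cases hc : checkCross (pvSet bB p q (-1)) + checkLine (pvSet bB p q (-1)) ≥ 3
        · rw [if_pos hc, if_pos hc]
          exact ⟨hsh', rfl, rfl, rfl, rfl, rfl, rfl, rfl⟩
        · rw [if_neg hc, if_neg hc]
          exact ⟨hsh', rfl, rfl, rfl, rfl, rfl, rfl, rfl⟩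

-- ===== VERDICT (by name: the statement is the Claim_ definition above) =====
theorem exe_bingo_spec : Claim_equal_exe_bingo := by
  unfold Claim_equal_exe_bingo
  intro bingo answer _ hpre
  unfold Spec_exe_bingo
  have hsh : Shape bingo := ⟨hpre.1, hpre.2.1⟩
  unfold exe_bingo exe_bingo_alt
  show ((List.range 25).foldl (stepA answer) (bingo, none)).2.getD 25
      = ((List.range 25).foldl (stepB answer)
          ⟨bingo,
            (List.range 5).map (fun i => (rowCnt bingo i : Int)),
            (List.range 5).map (fun j => (colCnt bingo j : Int)),
            (diagCnt bingo : Int), (antiCnt bingo : Int),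
            ((((List.range 5).map (fun i => (rowCnt bingo i : Int))).count 5 : Nat) : Int)
              + ((((List.range 5).map (fun j => (colCnt bingo j : Int))).count 5 : Nat) : Int)
              + (if (diagCnt bingo : Int) = 5 then 1 else 0)
              + (if (antiCnt bingo : Int) = 5 then 1 else 0),
            none⟩).done.getD 25
  have hlines0 : ((((List.range 5).map (fun i => (rowCnt bingo i : Int))).count 5 : Nat) : Int)
        + ((((List.range 5).map (fun j => (colCnt bingo j : Int))).count 5 : Nat) : Int)
        + (if (diagCnt bingo : Int) = 5 then 1 else 0)
        + (if (antiCnt bingo : Int) = 5 then 1 else 0)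
      = checkCross bingo + checkLine bingo := by
    have ed : ((diagCnt bingo : Int) = 5) ↔ diagCnt bingo = 5 := by omega
    have ea : ((antiCnt bingo : Int) = 5) ↔ antiCnt bingo = 5 := by omega
    rw [checkCross_eq, checkLine_eq, count5_map (rowCnt bingo), count5_map (colCnt bingo)]
    simp only [ed, ea]
    push_cast
    ring
  have key := foldl_sim BInv (stepA answer) (stepB answer) (stepInv answer) (List.range 25)
      (bingo, none)
      ⟨bingo,
            (List.range 5).map (fun i => (rowCnt bingo i : Int)),
            (List.range 5).map (fun j => (colCnt bingo j : Int)),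
            (diagCnt bingo : Int), (antiCnt bingo : Int),
            ((((List.range 5).map (fun i => (rowCnt bingo i : Int))).count 5 : Nat) : Int)
              + ((((List.range 5).map (fun j => (colCnt bingo j : Int))).count 5 : Nat) : Int)
              + (if (diagCnt bingo : Int) = 5 then 1 else 0)
              + (if (antiCnt bingo : Int) = 5 then 1 else 0),
            none⟩
      ⟨hsh, rfl, rfl, rfl, rfl, rfl, hlines0, rfl⟩
  rw [key.2.2.2.2.2.2.2]
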